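-- pv_equiv track=rewrite | github.com/AnshuExodus/Web-Scraper-Empyrean | omdb-lib/file-manager.py | cleanMovieName_rightSide
-- ===== SOURCE A (Python) =====
-- def cleanMovieName_rightSide(movieStr):
--     if(movieStr.find('(') != -1):
--         movieStr = movieStr[:movieStr.find('(')].rstrip()
--         movieStr = cleanMovieName_rightSide(movieStr)
--     if(movieStr.find('[') != -1):
--         movieStr = movieStr[:movieStr.find(']')].rstrip()
--         movieStr = cleanMovieName_rightSide(movieStr)
--     if(movieStr.find('{') != -1):
--         movieStr = movieStr[:movieStr.find('}')].rstrip()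
--         movieStr = cleanMovieName_rightSide(movieStr)
--     return movieStr
-- ===== SOURCE B (Python) =====
-- def cleanMovieName_rightSide(movieStr):
--     # Iterative first-match loop; A's recursion always returns a bracket-free
--     # string, so its three sequential ifs behave exactly like this elif chain.
--     s = movieStr
--     while True:
--         if '(' in s:
--             s = s[:s.find('(')].rstrip()
--         elif '[' in s:
--             s = s[:s.find(']')].rstrip()
--         elif '{' in s:
--             s = s[:s.find('}')].rstrip()
--         else:
--             return s
-- ===== Notes on version B (the rewrite author's own statement) =====
-- stated objective: simpler
-- what changed: Replaces A's triple nested self-recursion (three sequential ifs each re-calling the function) with a single iterative while-True loop using a first-match if/elif/else chain, justified by the invariant that every returned string is bracket-free; A's quirky cut positions (an opening square or curly bracket is detected but the cut happens at the first closing counterpart) are part of the function's behaviour and are kept exactly.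
import Mathlib
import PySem

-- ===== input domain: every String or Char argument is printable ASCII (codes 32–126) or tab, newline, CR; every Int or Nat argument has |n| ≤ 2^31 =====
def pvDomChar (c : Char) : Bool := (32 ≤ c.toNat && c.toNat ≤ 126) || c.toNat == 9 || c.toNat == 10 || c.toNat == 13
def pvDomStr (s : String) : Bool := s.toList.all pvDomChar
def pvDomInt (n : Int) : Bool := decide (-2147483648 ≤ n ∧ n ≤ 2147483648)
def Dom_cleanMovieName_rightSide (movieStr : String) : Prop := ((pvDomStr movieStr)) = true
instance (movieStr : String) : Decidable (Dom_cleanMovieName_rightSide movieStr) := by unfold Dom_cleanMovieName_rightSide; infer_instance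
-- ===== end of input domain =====

-- B replaces A's triple nested self-recursion by one iterative first-match
-- while-loop (simpler decomposition); the values agree on every input.

-- the cut step both Pythons write as  movieStr[:j].rstrip()
def pvCut (s : List Char) (j : Int) : List Char :=
  PySem.Chars.rstrip (PySem.Chars.slice s none (some j))

-- ===== PORT A =====
-- A's recursion, step for step; the fuel (length + 1) only makes the nested
-- self-calls structural: every self-call strictly shrinks the string (proved
-- below), so the fuel-0 branch is never reached from the wrapper.
def cleanARec : Nat → List Char → List Char
  | 0, s => s
  | f + 1, s =>
    let s1 := if PySem.Chars.find s ['('] ≠ -1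
      then cleanARec f (pvCut s (PySem.Chars.find s ['(']))
      else s
    let s2 := if PySem.Chars.find s1 ['['] ≠ -1
      then cleanARec f (pvCut s1 (PySem.Chars.find s1 [']']))
      else s1
    let s3 := if PySem.Chars.find s2 ['{'] ≠ -1
      then cleanARec f (pvCut s2 (PySem.Chars.find s2 ['}']))
      else s2
    s3

def cleanMovieName_rightSide (movieStr : String) : String :=
  String.ofList (cleanARec (movieStr.toList.length + 1) movieStr.toList)

-- ===== PORT B =====
-- the loop body shrinks the string: cited by cleanBLoop's decreasing_by
theorem pvRstrip_len_le (s : List Char) : (PySem.Chars.rstrip s).length ≤ s.length := by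
  simp only [PySem.Chars.rstrip]
  have := List.length_dropWhile_le (p := PySem.Chars.isspace) (l := s.reverse)
  simp only [List.length_reverse] at this ⊢
  omega

theorem pvCut_find_length_lt (s : List Char) (c d : Char) (hc : c ∈ s) :
    (pvCut s (PySem.Chars.find s [d])).length < s.length := by
  unfold pvCut
  have hne : s ≠ [] := by rintro rfl; simp at hc
  have hpos : 0 < s.length := List.length_pos_iff.mpr hne
  rcases eq_or_ne (PySem.Chars.find s [d]) (-1) with h | h
  · rw [h, PySem.Chars.slice_eq_listSlice, PySem.List.slice_to_neg_one]
    have h1 := pvRstrip_len_le s.dropLast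
    have h2 : s.dropLast.length = s.length - 1 := List.length_dropLast
    omega
  · have h0 : 0 ≤ PySem.Chars.find s [d] := by
      have := PySem.Chars.neg_one_le_find s [d]; omega
    have hpre := (PySem.Chars.find_spec h0).1
    have hnil : s.drop (PySem.Chars.find s [d]).toNat ≠ [] := by
      intro hnil; rw [hnil] at hpre; simp at hpre
    have hlt : (PySem.Chars.find s [d]).toNat < s.length := by
      by_contra hge
      exact hnil (List.drop_eq_nil_of_le (by omega))
    rw [PySem.Chars.slice_eq_listSlice, PySem.List.slice_to s h0]
    have h1 := pvRstrip_len_le (s.take (PySem.Chars.find s [d]).toNat)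
    have h2 : (s.take (PySem.Chars.find s [d]).toNat).length
        = min (PySem.Chars.find s [d]).toNat s.length := List.length_take
    omega

-- B's  while True: if '(' in s: … elif '[' in s: … elif '{' in s: … else: return s
def cleanBLoop (s : List Char) : List Char :=
  if h1 : PySem.Chars.isIn ['('] s = true then
    cleanBLoop (pvCut s (PySem.Chars.find s ['(']))
  else if h2 : PySem.Chars.isIn ['['] s = true then
    cleanBLoop (pvCut s (PySem.Chars.find s [']']))
  else if h3 : PySem.Chars.isIn ['{'] s = true then
    cleanBLoop (pvCut s (PySem.Chars.find s ['}']))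
  else s
termination_by s.length
decreasing_by
  · exact pvCut_find_length_lt s '(' '('
      ((List.singleton_infix_iff _ _).mp ((PySem.Chars.isIn_iff_infix _ _).mp h1))
  · exact pvCut_find_length_lt s '[' ']'
      ((List.singleton_infix_iff _ _).mp ((PySem.Chars.isIn_iff_infix _ _).mp h2))
  · exact pvCut_find_length_lt s '{' '}'
      ((List.singleton_infix_iff _ _).mp ((PySem.Chars.isIn_iff_infix _ _).mp h3))

def cleanMovieName_rightSide_alt (movieStr : String) : String :=
  String.ofList (cleanBLoop movieStr.toList)

-- ===== PRECONDITION & SPEC =====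
def Spec_cleanMovieName_rightSide (movieStr : String) (out : String) : Prop := out = cleanMovieName_rightSide_alt movieStr
instance (movieStr : String) (out : String) : Decidable (Spec_cleanMovieName_rightSide movieStr out) := by unfold Spec_cleanMovieName_rightSide; infer_instance

-- ===== CLAIM (what is proved, stated in full; the proofs are below) =====
def Claim_equal_cleanMovieName_rightSide : Prop := ∀ (movieStr : String), Dom_cleanMovieName_rightSide movieStr → Spec_cleanMovieName_rightSide movieStr (cleanMovieName_rightSide movieStr)

-- ===== LEMMAS AND PROOFS =====

-- membership ↔ A's "find ≠ -1" test ↔ B's "in" test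
theorem pvMem_iff_find_ne (s : List Char) (c : Char) :
    PySem.Chars.find s [c] ≠ -1 ↔ c ∈ s :=
  (PySem.Chars.find_ne_neg_one_iff s [c]).trans (List.singleton_infix_iff c s)

theorem pvIsIn_eq_true_iff (s : List Char) (c : Char) :
    PySem.Chars.isIn [c] s = true ↔ c ∈ s :=
  (PySem.Chars.isIn_iff_infix [c] s).trans (List.singleton_infix_iff c s)

theorem pvIsIn_eq_false (s : List Char) (c : Char) (h : c ∉ s) :
    PySem.Chars.isIn [c] s = false := by
  rcases hb : PySem.Chars.isIn [c] s with _ | _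
  · rfl
  · exact absurd ((pvIsIn_eq_true_iff s c).mp hb) h

-- B's loop result is bracket-free (this is why A's three sequential ifs
-- behave as a first-match elif chain)
theorem cleanBLoop_bracketfree (s : List Char) :
    '(' ∉ cleanBLoop s ∧ '[' ∉ cleanBLoop s ∧ '{' ∉ cleanBLoop s := by
  fun_induction cleanBLoop s with
  | case1 s h1 ih => exact ih
  | case2 s h1 h2 ih => exact ih
  | case3 s h1 h2 h3 ih => exact ih
  | case4 s h1 h2 h3 =>
    simp only [Bool.not_eq_true] at h1 h2 h3
    refine ⟨?_, ?_, ?_⟩ <;> intro hm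
    · exact ((PySem.Chars.isIn_eq_false_iff _ _).mp h1) ((List.singleton_infix_iff _ _).mpr hm)
    · exact ((PySem.Chars.isIn_eq_false_iff _ _).mp h2) ((List.singleton_infix_iff _ _).mpr hm)
    · exact ((PySem.Chars.isIn_eq_false_iff _ _).mp h3) ((List.singleton_infix_iff _ _).mpr hm)

theorem pvFind_eq_neg_one (s : List Char) (c : Char) (h : c ∉ s) :
    PySem.Chars.find s [c] = -1 := by
  by_contra hne
  exact h ((pvMem_iff_find_ne s c).mp hne)

-- main agreement: with fuel > length, A's recursion computes B's loop
theorem cleanARec_eq_cleanBLoop (f : Nat) :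
    ∀ s : List Char, s.length < f → cleanARec f s = cleanBLoop s := by
  induction f with
  | zero => intro s h; omega
  | succ f ih =>
    intro s hlen
    rw [cleanARec]
    by_cases h1 : PySem.Chars.find s ['('] ≠ -1
    · -- '(' present: A recurses once; the result is bracket-free, so the
      -- remaining two ifs of A are skipped
      have hmem : '(' ∈ s := (pvMem_iff_find_ne s '(').mp h1
      have hcut := pvCut_find_length_lt s '(' '(' hmem
      have hrec : cleanARec f (pvCut s (PySem.Chars.find s ['('])) =
          cleanBLoop (pvCut s (PySem.Chars.find s ['('])) := ih _ (by omega)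
      obtain ⟨hp, hb, hc⟩ := cleanBLoop_bracketfree (pvCut s (PySem.Chars.find s ['(']))
      simp only [if_pos h1, hrec, pvFind_eq_neg_one _ '[' hb, pvFind_eq_neg_one _ '{' hc,
        ne_eq, not_true_eq_false, if_false]
      conv_rhs => rw [cleanBLoop]
      simp [pvIsIn_eq_true_iff s '(' |>.mpr hmem]
    · have hnp : '(' ∉ s := fun hm => h1 ((pvMem_iff_find_ne s '(').mpr hm)
      simp only [if_neg h1]
      by_cases h2 : PySem.Chars.find s ['['] ≠ -1
      · have hmem : '[' ∈ s := (pvMem_iff_find_ne s '[').mp h2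
        have hcut := pvCut_find_length_lt s '[' ']' hmem
        have hrec : cleanARec f (pvCut s (PySem.Chars.find s [']'])) =
            cleanBLoop (pvCut s (PySem.Chars.find s [']'])) := ih _ (by omega)
        obtain ⟨hp, hb, hc⟩ := cleanBLoop_bracketfree (pvCut s (PySem.Chars.find s [']']))
        simp only [if_pos h2, hrec, pvFind_eq_neg_one _ '{' hc,
          ne_eq, not_true_eq_false, if_false]
        conv_rhs => rw [cleanBLoop]
        simp [pvIsIn_eq_false s '(' hnp, pvIsIn_eq_true_iff s '[' |>.mpr hmem]
      · have hnb : '[' ∉ s := fun hm => h2 ((pvMem_iff_find_ne s '[').mpr hm)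
        simp only [if_neg h2]
        by_cases h3 : PySem.Chars.find s ['{'] ≠ -1
        · have hmem : '{' ∈ s := (pvMem_iff_find_ne s '{').mp h3
          have hcut := pvCut_find_length_lt s '{' '}' hmem
          have hrec : cleanARec f (pvCut s (PySem.Chars.find s ['}'])) =
              cleanBLoop (pvCut s (PySem.Chars.find s ['}'])) := ih _ (by omega)
          simp only [if_pos h3, hrec]
          conv_rhs => rw [cleanBLoop]
          simp [pvIsIn_eq_false s '(' hnp, pvIsIn_eq_false s '[' hnb,
            pvIsIn_eq_true_iff s '{' |>.mpr hmem]
        · have hnc : '{' ∉ s := fun hm => h3 ((pvMem_iff_find_ne s '{').mpr hm)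
          simp only [if_neg h3]
          conv_rhs => rw [cleanBLoop]
          simp [pvIsIn_eq_false s '(' hnp, pvIsIn_eq_false s '[' hnb,
            pvIsIn_eq_false s '{' hnc]

-- ===== VERDICT (by name: the statement is the Claim_ definition above) =====
theorem cleanMovieName_rightSide_spec : Claim_equal_cleanMovieName_rightSide := by
  intro movieStr _
  unfold Spec_cleanMovieName_rightSide cleanMovieName_rightSide cleanMovieName_rightSide_alt
  rw [cleanARec_eq_cleanBLoop (movieStr.toList.length + 1) movieStr.toList (by omega)]
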